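-- pv_equiv track=rewrite | github.com/abhagyacharan/Mockr | backend/app/services/file_processor.py | validate_normalized_text
-- ===== SOURCE A (Python) =====
-- def validate_normalized_text(text: str) -> bool:
--     """
--     Validate that the normalized text is safe for JSON processing
--     """
--     if not text:
--         return False
--
--     # Check for problematic characters that could break JSON
--     problematic_chars = ["\n", "\r", "\t", "\x00", "\x08", "\x0c"]
--     for char in problematic_chars:
--         if char in text:
--             return False
--
--     # Check for excessive length (optional safeguard)
--     if len(text) > 50000:  # Adjust based on your needs
--         return False
--
--     return True
-- ===== SOURCE B (Python) =====
-- def validate_normalized_text(text: str) -> bool: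
--     """
--     Validate that the normalized text is safe for JSON processing
--     """
--     if not text:
--         return False
--
--     problematic = {"\n", "\r", "\t", "\x00", "\x08", "\x0c"}
--     if any(c in problematic for c in text):
--         return False
--
--     return len(text) <= 50000
-- ===== Notes on version B (the rewrite author's own statement) =====
-- stated objective: idiomatic
-- what changed: Instead of six sequential substring scans of text (one per problematic character), B does a single pass over text testing each character against a set of the six problematic characters, and folds the length check into the final return.
import Mathlib
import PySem

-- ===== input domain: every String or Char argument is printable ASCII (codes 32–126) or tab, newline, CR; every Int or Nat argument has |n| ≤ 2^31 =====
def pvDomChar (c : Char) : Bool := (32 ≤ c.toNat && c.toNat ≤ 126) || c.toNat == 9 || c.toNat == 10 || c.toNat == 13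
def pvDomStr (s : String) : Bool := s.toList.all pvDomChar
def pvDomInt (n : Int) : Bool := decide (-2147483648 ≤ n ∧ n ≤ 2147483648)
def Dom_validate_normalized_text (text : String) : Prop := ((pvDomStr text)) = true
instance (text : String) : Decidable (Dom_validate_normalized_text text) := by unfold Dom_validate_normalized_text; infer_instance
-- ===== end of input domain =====

-- B replaces A's six sequential substring scans with one pass over the text
-- against a set of the six problematic characters (objective: idiomatic).

-- ===== PORT A =====
-- the 'for char in problematic_chars: if char in text: return False' loop
def pvA_loop (chars : List String) (text : String) : Option Bool :=
  match chars with
  | [] => none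
  | c :: rest => if PySem.Str.isIn c text then some false else pvA_loop rest text

def validate_normalized_text (text : String) : Bool :=
  if text.toList = [] then false
  else
    let problematic_chars : List String := ["\n", "\r", "\t", "\x00", "\x08", "\x0c"]
    match pvA_loop problematic_chars text with
    | some b => b
    | none => if PySem.Str.len text > 50000 then false else true

-- ===== PORT B =====
def validate_normalized_text_alt (text : String) : Bool :=
  if text.toList = [] then false
  else
    let problematic : PySem.Set Char :=
      PySem.Set.ofList ['\n', '\r', '\t', '\x00', '\x08', '\x0c']
    if text.toList.any (fun c => PySem.Set.contains problematic c) then false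
    else decide (PySem.Str.len text ≤ 50000)

-- ===== PRECONDITION & SPEC =====
def Spec_validate_normalized_text (text : String) (out : Bool) : Prop := out = validate_normalized_text_alt text
instance (text : String) (out : Bool) : Decidable (Spec_validate_normalized_text text out) := by unfold Spec_validate_normalized_text; infer_instance

-- ===== CLAIM (what is proved, stated in full; the proofs are below) =====
def Claim_equal_validate_normalized_text : Prop := ∀ (text : String), Dom_validate_normalized_text text → Spec_validate_normalized_text text (validate_normalized_text text)

-- ===== LEMMAS AND PROOFS =====

-- a one-character substring occurs in text iff the character occurs in text
theorem pv_isIn_singleton (c : Char) (text : String) :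
    PySem.Str.isIn (String.ofList [c]) text = text.toList.contains c := by
  rw [Bool.eq_iff_iff, PySem.Str.isIn_iff_infix, List.contains_iff_mem]
  constructor
  · intro hinf; exact hinf.mem (by simp)
  · intro h
    rcases List.mem_iff_append.mp h with ⟨s, t, hst⟩
    exact ⟨s, t, by simp [hst]⟩

theorem pv_any_mem (l : List Char) :
    (l.any fun c => PySem.Set.contains
        (PySem.Set.ofList ['\n', '\r', '\t', '\x00', '\x08', '\x0c']) c)
      = (l.contains '\n' || l.contains '\r' || l.contains '\t' ||
         l.contains '\x00' || l.contains '\x08' || l.contains '\x0c') := by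
  induction l with
  | nil => decide
  | cons x xs ih =>
    simp only [List.any_cons, List.contains_cons, ih]
    rcases hx : PySem.Set.contains
        (PySem.Set.ofList ['\n', '\r', '\t', '\x00', '\x08', '\x0c']) x with _ | _
    · have : (x == '\n') = false ∧ (x == '\r') = false ∧ (x == '\t') = false ∧
          (x == '\x00') = false ∧ (x == '\x08') = false ∧ (x == '\x0c') = false := by
        refine ⟨?_, ?_, ?_, ?_, ?_, ?_⟩ <;>
          · rw [beq_eq_false_iff_ne]; rintro rfl; revert hx; decide
      rcases this with ⟨h1, h2, h3, h4, h5, h6⟩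
      simp only [beq_eq_false_iff_ne] at h1 h2 h3 h4 h5 h6
      have g1 : ('\n' == x) = false := beq_eq_false_iff_ne.mpr (Ne.symm h1)
      have g2 : ('\r' == x) = false := beq_eq_false_iff_ne.mpr (Ne.symm h2)
      have g3 : ('\t' == x) = false := beq_eq_false_iff_ne.mpr (Ne.symm h3)
      have g4 : ('\x00' == x) = false := beq_eq_false_iff_ne.mpr (Ne.symm h4)
      have g5 : ('\x08' == x) = false := beq_eq_false_iff_ne.mpr (Ne.symm h5)
      have g6 : ('\x0c' == x) = false := beq_eq_false_iff_ne.mpr (Ne.symm h6)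
      rw [g1, g2, g3, g4, g5, g6]
      simp
    · have : x = '\n' ∨ x = '\r' ∨ x = '\t' ∨ x = '\x00' ∨ x = '\x08' ∨ x = '\x0c' := by
        revert hx
        simp [PySem.Set.contains_eq_listContains, PySem.Set.ofList]
      rcases this with rfl | rfl | rfl | rfl | rfl | rfl <;> simp

-- ===== VERDICT (by name: the statement is the Claim_ definition above) =====
theorem validate_normalized_text_spec : Claim_equal_validate_normalized_text := by
  intro text _
  unfold Spec_validate_normalized_text validate_normalized_text validate_normalized_text_alt
  by_cases he : text.toList = []
  · simp [he]
  · simp only [he, if_false]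
    rw [pv_any_mem]
    simp only [pvA_loop]
    have e : ∀ c : Char, PySem.Str.isIn (String.ofList [c]) text = text.toList.contains c :=
      fun c => pv_isIn_singleton c text
    rw [show ("\n" : String) = String.ofList ['\n'] from rfl, e,
        show ("\r" : String) = String.ofList ['\r'] from rfl, e,
        show ("\t" : String) = String.ofList ['\t'] from rfl, e,
        show ("\x00" : String) = String.ofList ['\x00'] from rfl, e,
        show ("\x08" : String) = String.ofList ['\x08'] from rfl, e,
        show ("\x0c" : String) = String.ofList ['\x0c'] from rfl, e]
    split_ifs with h1 h2 h3 h4 h5 h6 h7 h8 h9 <;> simp_all
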